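-- pv_equiv track=rewrite | github.com/Glad-Labs/poindexter | src/cofounder_agent/tests/test_quality_assessor.py | _assess_accuracy
-- ===== SOURCE A (Python) =====
-- def _assess_accuracy(content: str) -> float:
--     """
--     Assess factual accuracy and confidence
--
--     Checks:
--     - Extreme claims
--     - Contradictions
--     - Unsupported assertions
--     """
--     score = 75  # Default (hard to verify without external sources)
--
--     # Deduct for extreme language
--     extreme_words = [
--         "always",
--         "never",
--         "definitely",
--         "absolutely",
--         "certainly",
--         "undoubtedly",
--         "obviously",
--         "unquestionably",
--     ]
--     extreme_count = sum(1 for word in extreme_words if f" {word} " in f" {content.lower()} ")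
--
--     if extreme_count > 5:
--         score -= 15
--     elif extreme_count > 3:
--         score -= 10
--
--     # Check for hedging language (good for accuracy)
--     hedging_words = [
--         "may",
--         "might",
--         "could",
--         "possibly",
--         "perhaps",
--         "likely",
--         "suggests",
--         "indicates",
--         "appears",
--         "seems",
--         "often",
--         "sometimes",
--     ]
--     hedging_count = sum(1 for word in hedging_words if f" {word} " in f" {content.lower()} ")
--
--     if hedging_count > 5:
--         score += 10
--
--     return min(100, max(0, score))
-- ===== SOURCE B (Python) =====
-- EXTREME_WORDS = set("always never definitely absolutely certainly undoubtedly obviously unquestionably".split())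
-- HEDGING_WORDS = set("may might could possibly perhaps likely suggests indicates appears seems often sometimes".split())
--
--
-- def _assess_accuracy(content: str) -> float:
--     # One tokenization + two set intersections instead of ~20 substring scans;
--     # split on a literal single space to mirror the space-padded substring test.
--     tokens = set(content.lower().split(' '))
--     extreme_count = len(tokens & EXTREME_WORDS)
--     hedging_count = len(tokens & HEDGING_WORDS)
--
--     score = 75
--     if extreme_count > 5:
--         score -= 15
--     elif extreme_count > 3:
--         score -= 10
--     if hedging_count > 5:
--         score += 10
--     return min(100, max(0, score))
-- ===== Notes on version B (the rewrite author's own statement) =====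
-- stated objective: faster
-- what changed: B tokenizes the lowered content once with split(' ') into a set and takes its intersection with precomputed extreme/hedging word sets, replacing A's ~20 per-word space-padded substring scans of the whole text.
import Mathlib
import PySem

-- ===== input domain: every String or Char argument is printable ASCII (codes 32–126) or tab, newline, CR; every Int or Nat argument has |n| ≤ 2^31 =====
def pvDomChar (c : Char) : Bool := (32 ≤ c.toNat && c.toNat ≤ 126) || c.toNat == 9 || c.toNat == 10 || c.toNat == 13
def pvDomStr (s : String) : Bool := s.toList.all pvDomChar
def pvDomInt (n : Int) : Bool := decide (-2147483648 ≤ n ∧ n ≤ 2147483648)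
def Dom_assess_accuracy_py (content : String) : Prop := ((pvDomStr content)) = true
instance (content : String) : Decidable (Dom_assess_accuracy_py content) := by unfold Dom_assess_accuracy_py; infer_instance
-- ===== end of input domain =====

-- B builds a token set once (split on a literal space) and counts vocabulary hits by set
-- intersection, instead of A's per-word space-padded substring scans of the whole text.


-- ===== PORT A =====
-- A's two word lists, as in the Python source
def pvExtremeWords : List (List Char) :=
  ["always".toList, "never".toList, "definitely".toList, "absolutely".toList,
   "certainly".toList, "undoubtedly".toList, "obviously".toList, "unquestionably".toList]

def pvHedgingWords : List (List Char) :=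
  ["may".toList, "might".toList, "could".toList, "possibly".toList, "perhaps".toList,
   "likely".toList, "suggests".toList, "indicates".toList, "appears".toList, "seems".toList,
   "often".toList, "sometimes".toList]

-- sum(1 for word in ws if f" {word} " in f" {content.lower()} ")  — a 0/1 generator sum is countP
def assess_accuracy_py (content : String) : Int :=
  let padded : List Char := ' ' :: (PySem.Chars.lower content.toList ++ [' '])
  let extreme_count : Nat :=
    pvExtremeWords.countP (fun word => PySem.Chars.isIn (' ' :: (word ++ [' '])) padded)
  let score1 : Int := if extreme_count > 5 then 75 - 15 else if extreme_count > 3 then 75 - 10 else 75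
  let hedging_count : Nat :=
    pvHedgingWords.countP (fun word => PySem.Chars.isIn (' ' :: (word ++ [' '])) padded)
  let score2 : Int := if hedging_count > 5 then score1 + 10 else score1
  min 100 (max 0 score2)

-- ===== PORT B =====
-- module-level vocabularies: set("… … …".split())
def pvExtremeSet : PySem.Set (List Char) :=
  PySem.Set.ofList (PySem.Chars.split₀
    "always never definitely absolutely certainly undoubtedly obviously unquestionably".toList)

def pvHedgingSet : PySem.Set (List Char) :=
  PySem.Set.ofList (PySem.Chars.split₀
    "may might could possibly perhaps likely suggests indicates appears seems often sometimes".toList)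

def assess_accuracy_py_alt (content : String) : Int :=
  let tokens : PySem.Set (List Char) :=
    PySem.Set.ofList ((PySem.Chars.lower content.toList).splitOn ' ')
  let extreme_count : Nat := (PySem.Set.inter tokens pvExtremeSet).length
  let hedging_count : Nat := (PySem.Set.inter tokens pvHedgingSet).length
  let score1 : Int := if extreme_count > 5 then 75 - 15 else if extreme_count > 3 then 75 - 10 else 75
  let score2 : Int := if hedging_count > 5 then score1 + 10 else score1
  min 100 (max 0 score2)

-- ===== PRECONDITION & SPEC =====
def Spec_assess_accuracy_py (content : String) (out : Int) : Prop := out = assess_accuracy_py_alt content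
instance (content : String) (out : Int) : Decidable (Spec_assess_accuracy_py content out) := by unfold Spec_assess_accuracy_py; infer_instance

-- ===== CLAIM (what is proved, stated in full; the proofs are below) =====
def Claim_equal_assess_accuracy_py : Prop := ∀ (content : String), Dom_assess_accuracy_py content → Spec_assess_accuracy_py content (assess_accuracy_py content)

-- ===== LEMMAS AND PROOFS =====

-- head of splitOnP is the longest ¬p-prefix
theorem pv_head?_splitOnP (p : Char → Bool) (cs : List Char) :
    (List.splitOnP p cs).head? = some (cs.takeWhile (fun c => !p c)) := by
  induction cs with
  | nil => simp [List.splitOnP_nil]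
  | cons c cs ih =>
    rw [List.splitOnP_cons]
    by_cases hc : p c = true
    · simp [hc, -Bool.forall_bool]
    · rcases List.exists_cons_of_ne_nil (List.splitOnP_ne_nil p cs) with ⟨a, l, hl⟩
      rw [hl] at ih ⊢
      simp only [List.head?_cons, Option.some.injEq] at ih
      simp [List.modifyHead_cons, hc, ih]

-- space-free word followed by a space, as a prefix: it is exactly the first token
theorem pv_prefix_iff_takeWhile (w : List Char) (hsp : ' ' ∉ w) (cs : List Char) :
    ((w ++ [' ']) <+: (cs ++ [' '])) ↔ cs.takeWhile (fun c => !(c == ' ')) = w := by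
  induction w generalizing cs with
  | nil =>
    cases cs with
    | nil => simp
    | cons c cs' =>
      simp only [List.nil_append, List.cons_append, List.cons_prefix_cons, List.takeWhile_cons]
      constructor
      · rintro ⟨h, -⟩; simp [← h]
      · intro h
        by_cases hc : (c == ' ') = true
        · exact ⟨(beq_iff_eq.mp hc).symm, List.nil_prefix⟩
        · simp [hc] at h
  | cons a w' ih =>
    have ha : a ≠ ' ' := fun h => hsp (h ▸ List.mem_cons_self)
    have hsp' : ' ' ∉ w' := fun h => hsp (List.mem_cons_of_mem _ h)
    cases cs with
    | nil =>
      simp only [List.cons_append, List.nil_append, List.cons_prefix_cons, List.takeWhile_nil]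
      constructor
      · rintro ⟨h, -⟩; exact absurd h ha
      · intro h; exact absurd h (by simp)
    | cons c cs' =>
      simp only [List.cons_append, List.cons_prefix_cons]
      by_cases hc : (c == ' ') = true
      · have hc' : c = ' ' := beq_iff_eq.mp hc
        rw [List.takeWhile_cons_of_neg (by simp [hc'])]
        constructor
        · rintro ⟨h, -⟩; exact absurd (h ▸ hc') ha
        · intro h; simp at h
      · rw [List.takeWhile_cons_of_pos (by simp [hc])]
        constructor
        · rintro ⟨h1, h2⟩
          rw [List.cons_eq_cons]
          exact ⟨h1.symm, (ih hsp' cs').mp h2⟩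
        · intro h
          rw [List.cons_eq_cons] at h
          exact ⟨h.1.symm, (ih hsp' cs').mpr h.2⟩

-- an internal occurrence (a space strictly before the word) finds the word among the later tokens
theorem pv_infix_tail (w : List Char) (hw : w ≠ []) (hsp : ' ' ∉ w) (cs : List Char) :
    ((' ' :: (w ++ [' '])) <:+: (cs ++ [' '])) ↔
      w ∈ (List.splitOnP (fun c => c == ' ') cs).tail := by
  induction cs with
  | nil =>
    simp only [List.nil_append, List.splitOnP_nil, List.tail_cons, List.not_mem_nil, iff_false]
    intro h
    have := h.length_le
    cases w with
    | nil => exact hw rfl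
    | cons a w' => simp at this
  | cons c cs' ih =>
    rw [List.cons_append, List.infix_cons_iff, List.splitOnP_cons]
    by_cases hc : (c == ' ') = true
    · have hc' : c = ' ' := beq_iff_eq.mp hc
      rcases List.exists_cons_of_ne_nil (List.splitOnP_ne_nil (fun c => c == ' ') cs') with ⟨a, l, hl⟩
      have hhead : a = cs'.takeWhile (fun c => !(c == ' ')) := by
        have := pv_head?_splitOnP (fun c => c == ' ') cs'
        rw [hl] at this; simpa using this
      rw [if_pos hc, hc', List.tail_cons, hl, List.mem_cons]
      constructor
      · rintro (hpre | hinf)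
        · rw [List.cons_prefix_cons] at hpre
          left
          rw [hhead, ← (pv_prefix_iff_takeWhile w hsp cs').mp hpre.2]
        · right
          have h3 := (ih).mp hinf
          rw [hl, List.tail_cons] at h3
          exact h3
      · rintro (heq | hmem)
        · left
          rw [List.cons_prefix_cons]
          refine ⟨rfl, (pv_prefix_iff_takeWhile w hsp cs').mpr ?_⟩
          rw [← hhead, heq]
        · right
          apply (ih).mpr
          rw [hl, List.tail_cons]
          exact hmem
    · rw [if_neg hc, List.tail_modifyHead]
      constructor
      · rintro (hpre | hinf)
        · rw [List.cons_prefix_cons] at hpre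
          exact absurd hpre.1.symm (by simpa using hc)
        · exact (ih).mp hinf
      · intro hmem
        exact Or.inr ((ih).mpr hmem)

-- the padded substring test is token membership
theorem pv_isIn_iff_mem (w : List Char) (hw : w ≠ []) (hsp : ' ' ∉ w) (cs : List Char) :
    PySem.Chars.isIn (' ' :: (w ++ [' '])) (' ' :: (cs ++ [' '])) = true ↔
      w ∈ List.splitOnP (fun c => c == ' ') cs := by
  rw [PySem.Chars.isIn_iff_infix, List.infix_cons_iff]
  rcases List.exists_cons_of_ne_nil (List.splitOnP_ne_nil (fun c => c == ' ') cs) with ⟨a, l, hl⟩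
  have hhead : a = cs.takeWhile (fun c => !(c == ' ')) := by
    have := pv_head?_splitOnP (fun c => c == ' ') cs
    rw [hl] at this; simpa using this
  rw [hl, List.mem_cons]
  constructor
  · rintro (hpre | hinf)
    · rw [List.cons_prefix_cons] at hpre
      left
      rw [hhead, ← (pv_prefix_iff_takeWhile w hsp cs).mp hpre.2]
    · right
      have := (pv_infix_tail w hw hsp cs).mp hinf
      rw [hl, List.tail_cons] at this
      exact this
  · rintro (heq | hmem)
    · left
      rw [List.cons_prefix_cons]
      refine ⟨rfl, (pv_prefix_iff_takeWhile w hsp cs).mpr ?_⟩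
      rw [← hhead, heq]
    · right
      apply (pv_infix_tail w hw hsp cs).mpr
      rw [hl, List.tail_cons]
      exact hmem

-- symmetric counting: two nodup lists see each other equally often
theorem pv_countP_mem_comm {α : Type} [BEq α] [LawfulBEq α] (s t : List α)
    (hs : s.Nodup) (ht : t.Nodup) :
    s.countP (fun x => decide (x ∈ t)) = t.countP (fun x => decide (x ∈ s)) := by
  rw [List.countP_eq_length_filter, List.countP_eq_length_filter]
  apply List.Perm.length_eq
  rw [List.perm_ext_iff_of_nodup (hs.filter _) (ht.filter _)]
  intro a
  simp only [List.mem_filter, decide_eq_true_eq]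
  tauto

-- the common counting step: A's per-word scan count = B's intersection size
theorem pv_count_eq (E : List (List Char)) (hE : E.Nodup)
    (hwords : ∀ w ∈ E, w ≠ [] ∧ ' ' ∉ w) (cs : List Char) :
    E.countP (fun word => PySem.Chars.isIn (' ' :: (word ++ [' '])) (' ' :: (cs ++ [' ']))) =
      (PySem.Set.inter (PySem.Set.ofList (cs.splitOn ' ')) (PySem.Set.ofList E)).length := by
  have hsplit : cs.splitOn ' ' = List.splitOnP (fun c => c == ' ') cs := rfl
  calc E.countP (fun word => PySem.Chars.isIn (' ' :: (word ++ [' '])) (' ' :: (cs ++ [' '])))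
      = E.countP (fun w => decide (w ∈ PySem.Set.ofList (cs.splitOn ' '))) := by
        apply List.countP_congr
        intro w hwmem
        rcases hwords w hwmem with ⟨hne, hsp⟩
        simpa [hsplit, PySem.Set.mem_ofList] using pv_isIn_iff_mem w hne hsp cs
    _ = (PySem.Set.ofList (cs.splitOn ' ')).countP (fun x => decide (x ∈ E)) := by
        exact pv_countP_mem_comm E (PySem.Set.ofList (cs.splitOn ' ')) hE (PySem.Set.nodup_ofList _)
    _ = (PySem.Set.inter (PySem.Set.ofList (cs.splitOn ' ')) (PySem.Set.ofList E)).length := by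
        show _ = (List.filter _ _).length
        rw [← List.countP_eq_length_filter]
        apply List.countP_congr
        intro x _
        simp [PySem.Set.mem_ofList]

theorem pv_extreme_nodup : pvExtremeWords.Nodup := by decide
theorem pv_hedging_nodup : pvHedgingWords.Nodup := by decide
theorem pv_extreme_words_ok : ∀ w ∈ pvExtremeWords, w ≠ [] ∧ ' ' ∉ w := by decide
theorem pv_hedging_words_ok : ∀ w ∈ pvHedgingWords, w ≠ [] ∧ ' ' ∉ w := by decide
theorem pv_extreme_set_eq : pvExtremeSet = PySem.Set.ofList pvExtremeWords := by decide
theorem pv_hedging_set_eq : pvHedgingSet = PySem.Set.ofList pvHedgingWords := by decide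

-- ===== VERDICT (by name: the statement is the Claim_ definition above) =====
theorem assess_accuracy_py_spec : Claim_equal_assess_accuracy_py := by
  intro content _
  unfold Spec_assess_accuracy_py assess_accuracy_py assess_accuracy_py_alt
  simp only [pv_extreme_set_eq, pv_hedging_set_eq]
  rw [pv_count_eq pvExtremeWords pv_extreme_nodup pv_extreme_words_ok,
      pv_count_eq pvHedgingWords pv_hedging_nodup pv_hedging_words_ok]
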